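-- pv_equiv track=rewrite | github.com/pcw24601/advent-of-code | 2023/14/aoc14b.py | roll_line_to_side
-- ===== SOURCE A (Python) =====
-- def roll_line_to_side(input_str):
--     this_str, *other_str = input_str.split('#', maxsplit=1)
--     num_O = this_str.count('O')
--     num_dot = this_str.count('.')
--     new_str = 'O' * num_O + '.' * num_dot
--     if len(other_str) > 0:
--         new_str += '#' + roll_line_to_side(other_str[0])
--     return new_str
-- ===== SOURCE B (Python) =====
-- def roll_line_to_side(input_str):
--     return '#'.join('O' * seg.count('O') + '.' * seg.count('.')
--                     for seg in input_str.split('#'))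
-- ===== Notes on version B (the rewrite author's own statement) =====
-- stated objective: simpler
-- what changed: Replaces A's recursive maxsplit=1 peeling of one '#'-segment at a time with a single full split on '#', a per-segment rebuild, and one join.
import Mathlib
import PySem

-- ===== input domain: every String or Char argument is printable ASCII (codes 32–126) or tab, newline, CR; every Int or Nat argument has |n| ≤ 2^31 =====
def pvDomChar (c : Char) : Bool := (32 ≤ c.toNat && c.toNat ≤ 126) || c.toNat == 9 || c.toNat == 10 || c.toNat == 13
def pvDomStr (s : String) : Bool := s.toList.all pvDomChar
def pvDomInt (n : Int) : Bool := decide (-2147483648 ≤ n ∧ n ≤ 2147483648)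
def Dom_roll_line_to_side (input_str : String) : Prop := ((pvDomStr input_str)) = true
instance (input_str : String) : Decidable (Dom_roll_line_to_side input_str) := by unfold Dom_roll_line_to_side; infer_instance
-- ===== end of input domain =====

-- B replaces A's recursive maxsplit=1 peeling with a single split-on-'#' / per-segment rebuild / join pass (objective: simpler).

-- ===== PORT A =====
-- The next three lemmas exist only to justify termination of the recursive port of A
-- (decreasing_by cites pvSplitOnMax1_remainder_lt by name).
theorem pvGoMax0 (fuel : Nat) (l : List Char) (acc : List (List Char)) (hf : 0 < fuel) :
    PySem.Chars.splitOnMax.go ['#'] fuel 0 l [] acc = (l :: acc).reverse := by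
  match fuel, l with
  | fuel+1, [] => simp [PySem.Chars.splitOnMax.go]
  | fuel+1, c :: rest => simp [PySem.Chars.splitOnMax.go]

theorem pvGoMax1 : ∀ (fuel : Nat) (cs cur : List Char) (acc : List (List Char)), cs.length < fuel →
    PySem.Chars.splitOnMax.go ['#'] fuel 1 cs cur acc =
      match cs.dropWhile (· != '#') with
      | [] => ((cur.reverse ++ cs) :: acc).reverse
      | _ :: rest => acc.reverse ++ [cur.reverse ++ cs.takeWhile (· != '#'), rest]
  | fuel+1, [], cur, acc, h => by simp [PySem.Chars.splitOnMax.go]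
  | fuel+1, c :: rest, cur, acc, h => by
    by_cases hc : c = '#'
    · subst hc
      simp only [PySem.Chars.splitOnMax.go, List.isPrefixOf, BEq.rfl, Bool.and_self, if_true,
        if_neg (one_ne_zero), List.length_cons, List.length_nil]
      simp only [show (1:Nat)-1=0 from rfl, show (0:Nat)+1=1 from rfl, List.drop_succ_cons, List.drop_zero]
      rw [pvGoMax0 fuel rest _ (by simp at h; omega)]
      simp [List.dropWhile, List.takeWhile]
    · have hpre : List.isPrefixOf ['#'] (c :: rest) = false := by
        simp [List.isPrefixOf]; exact fun hh => hc hh.symm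
      rw [show PySem.Chars.splitOnMax.go ['#'] (fuel+1) 1 (c :: rest) cur acc
            = PySem.Chars.splitOnMax.go ['#'] fuel 1 rest (c :: cur) acc from by
          simp [PySem.Chars.splitOnMax.go, hpre]]
      rw [pvGoMax1 fuel rest (c :: cur) acc (by simp at h; omega)]
      have hc' : (c != '#') = true := by simp [hc]
      simp only [List.dropWhile, List.takeWhile, hc', cond_true]
      cases hdw : List.dropWhile (fun x => x != '#') rest <;> simp

-- splitOnMax with maxsplit = 1 and separator ['#'], characterised by takeWhile/dropWhile.
theorem pvSplitOnMax1_eq (cs : List Char) :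
    PySem.Chars.splitOnMax cs ['#'] 1 =
      match cs.dropWhile (· != '#') with
      | [] => [cs]
      | _ :: rest => [cs.takeWhile (· != '#'), rest] := by
  rw [PySem.Chars.splitOnMax, if_neg (by omega)]
  simp only [Int.toNat_one]
  rw [pvGoMax1 (cs.length+1) cs [] [] (by omega)]
  cases hdw : cs.dropWhile (· != '#') <;> simp

theorem pvSplitOnMax1_remainder_lt (cs : List Char)
    (h : 0 < (PySem.Chars.splitOnMax cs ['#'] 1).tail.length) :
    ((PySem.Chars.splitOnMax cs ['#'] 1).tail.headI).length < cs.length := by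
  rw [pvSplitOnMax1_eq] at *
  cases hdw : cs.dropWhile (· != '#') with
  | nil => simp [hdw] at h
  | cons d rest =>
    have hle := List.length_dropWhile_le (· != '#') cs
    rw [hdw] at hle
    simp [hdw]
    simp at hle
    omega

def rollA (cs : List Char) : List Char :=
  let parts := PySem.Chars.splitOnMax cs ['#'] 1          -- this_str, *other_str = input_str.split('#', maxsplit=1)
  let this_str := parts.headI
  let other_str := parts.tail
  let new_str := PySem.List.pyRepeat ['O'] ((PySem.Chars.count this_str ['O'] : Int))   -- 'O' * num_O
              ++ PySem.List.pyRepeat ['.'] ((PySem.Chars.count this_str ['.'] : Int))   -- + '.' * num_dot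
  if h : 0 < other_str.length then new_str ++ '#' :: rollA other_str.headI else new_str
termination_by cs.length
decreasing_by exact pvSplitOnMax1_remainder_lt cs h

def roll_line_to_side (input_str : String) : String :=
  String.mk (rollA input_str.toList)

-- ===== PORT B =====
-- 'O' * seg.count('O') + '.' * seg.count('.')
def rollSegB (seg : List Char) : List Char :=
  PySem.List.pyRepeat ['O'] ((PySem.Chars.count seg ['O'] : Int))
    ++ PySem.List.pyRepeat ['.'] ((PySem.Chars.count seg ['.'] : Int))

-- '#'.join(rebuilt seg for seg in input_str.split('#'))
def roll_line_to_side_alt (input_str : String) : String :=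
  String.mk (PySem.Chars.join ['#'] ((PySem.Chars.splitOn input_str.toList ['#']).map rollSegB))

-- ===== PRECONDITION & SPEC =====
def Spec_roll_line_to_side (input_str : String) (out : String) : Prop := out = roll_line_to_side_alt input_str
instance (input_str : String) (out : String) : Decidable (Spec_roll_line_to_side input_str out) := by unfold Spec_roll_line_to_side; infer_instance

-- ===== CLAIM (what is proved, stated in full; the proofs are below) =====
def Claim_equal_roll_line_to_side : Prop := ∀ (input_str : String), Dom_roll_line_to_side input_str → Spec_roll_line_to_side input_str (roll_line_to_side input_str)

-- ===== LEMMAS AND PROOFS =====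

theorem pvGoSplit : ∀ (fuel : Nat) (cs cur : List Char) (acc : List (List Char)), cs.length < fuel →
    PySem.Chars.splitOn.go ['#'] fuel cs cur acc
      = acc.reverse ++ (cs.splitOn '#').modifyHead (cur.reverse ++ ·)
  | fuel+1, [], cur, acc, h => by
    simp [PySem.Chars.splitOn.go, List.splitOn, List.splitOnP_nil]
  | fuel+1, c :: rest, cur, acc, h => by
    by_cases hc : c = '#'
    · subst hc
      rw [show PySem.Chars.splitOn.go ['#'] (fuel+1) ('#' :: rest) cur acc
            = PySem.Chars.splitOn.go ['#'] fuel rest [] (cur.reverse :: acc) from by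
          simp [PySem.Chars.splitOn.go, List.isPrefixOf]]
      rw [pvGoSplit fuel rest [] _ (by simp at h; omega)]
      obtain ⟨hd, tl, he⟩ := List.exists_cons_of_ne_nil (List.splitOnP_ne_nil (· == '#') rest)
      simp [List.splitOn, List.splitOnP_cons, he]
    · have hpre : List.isPrefixOf ['#'] (c :: rest) = false := by
        simp [List.isPrefixOf]; exact fun hh => hc hh.symm
      rw [show PySem.Chars.splitOn.go ['#'] (fuel+1) (c :: rest) cur acc
            = PySem.Chars.splitOn.go ['#'] fuel rest (c :: cur) acc from by
          simp [PySem.Chars.splitOn.go, hpre]]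
      rw [pvGoSplit fuel rest (c :: cur) acc (by simp at h; omega)]
      have hc' : ((c == '#') = true) = False := by simp [hc]
      obtain ⟨hd, tl, he⟩ := List.exists_cons_of_ne_nil (List.splitOnP_ne_nil (· == '#') rest)
      simp [List.splitOn, List.splitOnP_cons, hc', he]

-- PySem.Chars.splitOn with separator ['#'] is core List.splitOn '#'.
theorem pvSplitOn_char_eq (cs : List Char) :
    PySem.Chars.splitOn cs ['#'] = cs.splitOn '#' := by
  rw [PySem.Chars.splitOn, pvGoSplit (cs.length+1) cs [] [] (by omega)]
  obtain ⟨hd, tl, he⟩ := List.exists_cons_of_ne_nil (List.splitOnP_ne_nil (· == '#') cs)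
  simp [List.splitOn] at he ⊢
  simp [he]

-- List.splitOn '#' peels the first segment exactly as takeWhile/dropWhile do.
theorem pvListSplitOn_peel (cs : List Char) :
    cs.splitOn '#' =
      match cs.dropWhile (· != '#') with
      | [] => [cs]
      | _ :: rest => cs.takeWhile (· != '#') :: rest.splitOn '#' := by
  induction cs with
  | nil => simp [List.splitOn, List.splitOnP_nil]
  | cons c rest ih =>
    by_cases hc : c = '#'
    · subst hc
      simp [List.splitOn, List.splitOnP_cons, List.dropWhile, List.takeWhile]
    · have hc' : (c != '#') = true := by simp [hc]
      simp only [List.splitOn, List.splitOnP_cons, List.dropWhile, List.takeWhile, hc',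
        cond_true, show ((c == '#') = true) = False by simp [hc], if_false]
      rw [show List.splitOnP (fun x => x == '#') rest = rest.splitOn '#' from rfl, ih]
      cases hdw : rest.dropWhile (· != '#') <;> simp [List.splitOn]

-- A's recursion computes exactly B's split/map/join result.
theorem pvRollA_eq (cs : List Char) :
    rollA cs = PySem.Chars.join ['#'] ((cs.splitOn '#').map rollSegB) := by
  generalize hn : cs.length = n
  induction n using Nat.strong_induction_on generalizing cs with
  | _ n ih =>
  rw [rollA, pvSplitOnMax1_eq, pvListSplitOn_peel]
  cases hdw : cs.dropWhile (· != '#') with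
  | nil => simp [rollSegB, PySem.Chars.join, List.intercalate]
  | cons d rest =>
    have hle := List.length_dropWhile_le (· != '#') cs
    rw [hdw] at hle; simp at hle
    obtain ⟨hd, tl, he⟩ := List.exists_cons_of_ne_nil (List.splitOnP_ne_nil (· == '#') rest)
    have he' : rest.splitOn '#' = hd :: tl := he
    simp [rollSegB, PySem.Chars.join, List.intercalate, he',
      ih rest.length (by omega) rest rfl]

-- ===== VERDICT (by name: the statement is the Claim_ definition above) =====
theorem roll_line_to_side_spec : Claim_equal_roll_line_to_side := by
  intro s _
  unfold Spec_roll_line_to_side roll_line_to_side roll_line_to_side_alt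
  rw [pvRollA_eq, pvSplitOn_char_eq]
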